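-- pv_equiv track=rewrite | github.com/Valps/TCC_QCD2 | Espectro_supersimetria.py | verify_cyclic
-- ===== SOURCE A (Python) =====
-- def verify(list_1,list_2):      # verificar se duas sequências são idênticas
--     for l in range(len(list_1)):
--         if(list_1[l] != list_2[l]):
--             return False
--     return True
--
-- def verify_cyclic(array_1, array_2):
--     is_cyclic = False
--     result = -1    #  0: is_cyclic = False,   -1: is_cyclic = True & parity = -1,   1: is_cyclic = True & parity = 1
--     cycles = 0
--     concatene = array_1 + array_1
--     p = len(array_1)
--     for i in range(p):
--         if(verify(concatene[i:i+p], array_2)):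
--             is_cyclic = True
--             break
--         cycles += 1
--
--     parity = (-1)**( (len(array_1)+1)*cycles )
--
--     result = is_cyclic*parity
--     return result
-- ===== SOURCE B (Python) =====
-- def verify_cyclic(array_1, array_2):
--     # Rabin-Karp: rolling hash over the doubled array; a full comparison is
--     # attempted only at shifts whose window hash equals the pattern hash.
--     p = len(array_1)
--     if p == 0:
--         return 0
--     pattern = array_2[:p]
--     text = array_1 + array_1
--     M = (1 << 61) - 1
--     B = 1000003
--     hp = 0
--     for x in pattern:
--         hp = (hp * B + x) % M
--     hw = 0
--     for x in text[:p]: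
--         hw = (hw * B + x) % M
--     Bp = pow(B, p - 1, M)
--     shift = -1
--     for i in range(p):
--         if hw == hp and text[i:i+p] == pattern:
--             shift = i
--             break
--         hw = ((hw - text[i] * Bp) * B + text[i + p]) % M
--     if shift == -1:
--         return 0
--     return -1 if (p % 2 == 0 and shift % 2 == 1) else 1
-- ===== Notes on version B (the rewrite author's own statement) =====
-- stated objective: faster
-- what changed: A rescans every rotation elementwise (nested loops over the doubled array); B is a Rabin-Karp matcher: a rolling polynomial hash over the doubled array, with the full window comparison attempted only at shifts whose hash equals the pattern hash, then the same parity formula on the first matching shift.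
import Mathlib
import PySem

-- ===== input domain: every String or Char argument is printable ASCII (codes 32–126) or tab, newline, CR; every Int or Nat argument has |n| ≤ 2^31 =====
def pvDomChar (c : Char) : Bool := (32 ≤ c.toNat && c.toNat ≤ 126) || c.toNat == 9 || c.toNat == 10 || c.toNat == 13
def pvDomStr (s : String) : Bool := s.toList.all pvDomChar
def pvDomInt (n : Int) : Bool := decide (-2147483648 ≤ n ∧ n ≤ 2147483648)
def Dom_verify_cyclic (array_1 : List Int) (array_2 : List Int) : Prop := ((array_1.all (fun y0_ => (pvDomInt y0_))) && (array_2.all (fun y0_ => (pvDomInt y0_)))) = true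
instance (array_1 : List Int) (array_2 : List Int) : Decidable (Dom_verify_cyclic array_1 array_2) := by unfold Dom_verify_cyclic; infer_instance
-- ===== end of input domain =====

-- B replaces A's shift-by-shift elementwise rescan with a Rabin–Karp rolling hash
-- (full comparison only on a hash hit); return value only, no mutation on either side.

-- ===== PORT A =====
-- for l in range(len(list_1)): if list_1[l] != list_2[l]: return False
-- (list_2[l] ported with getD: under Pre_ every index accessed is in range, exact there)
def verifyLoop (list_1 list_2 : List Int) : Nat → Nat → Bool
  | _, 0 => true
  | l, rem + 1 =>
    if list_1.getD l 0 ≠ list_2.getD l 0 then false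
    else verifyLoop list_1 list_2 (l + 1) rem

def verify (list_1 list_2 : List Int) : Bool := verifyLoop list_1 list_2 0 list_1.length

-- for i in range(p): if verify(concatene[i:i+p], array_2): break ; cycles += 1
-- (the loop is driven by the count of remaining iterations rem = p - i)
def acLoop (concatene array_2 : List Int) (p : Nat) : Nat → Nat → Nat → Bool × Nat
  | _, cycles, 0 => (false, cycles)
  | i, cycles, rem + 1 =>
    if verify (PySem.List.slice concatene (some (i : Int)) (some ((i : Int) + (p : Int)))) array_2 then
      (true, cycles)
    else acLoop concatene array_2 p (i + 1) (cycles + 1) rem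

def verify_cyclic (array_1 : List Int) (array_2 : List Int) : Int :=
  let concatene := array_1 ++ array_1
  let p := array_1.length
  let r := acLoop concatene array_2 p 0 0 p
  let parity : Int := (-1) ^ ((array_1.length + 1) * r.2)
  (if r.1 then (1 : Int) else 0) * parity

-- ===== PORT B =====
def pyM : Int := 2 ^ 61 - 1
def pyB : Int := 1000003

-- h = (h*B + x) % M
def hstep (h x : Int) : Int := PySem.Int.mod (h * pyB + x) pyM

-- for i in range(p): if hw == hp and text[i:i+p] == pattern: shift = i; break
--                    hw = ((hw - text[i]*Bp)*B + text[i+p]) % M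
-- (text[i], text[i+p] ported with getD: 0 ≤ i < p and i+p < 2p = len(text), always in range)
-- (the loop is driven by the count of remaining iterations rem = p - i)
def rkLoop (text pattern : List Int) (p : Nat) (hp Bp : Int) : Nat → Int → Nat → Int
  | _, _, 0 => -1
  | i, hw, rem + 1 =>
    if hw = hp ∧ PySem.List.slice text (some (i : Int)) (some ((i : Int) + (p : Int))) = pattern then
      (i : Int)
    else
      rkLoop text pattern p hp Bp (i + 1)
        (PySem.Int.mod ((hw - text.getD i 0 * Bp) * pyB + text.getD (i + p) 0) pyM) rem

def verify_cyclic_alt (array_1 : List Int) (array_2 : List Int) : Int :=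
  let p := array_1.length
  if p = 0 then 0
  else
    let pattern := PySem.List.slice array_2 none (some (p : Int))
    let text := array_1 ++ array_1
    let hp := pattern.foldl hstep 0
    let hw0 := (PySem.List.slice text none (some (p : Int))).foldl hstep 0
    let Bp := PySem.Int.powMod pyB (p - 1) pyM
    let shift := rkLoop text pattern p hp Bp 0 hw0 p
    if shift = -1 then 0
    else if p % 2 = 0 ∧ PySem.Int.mod shift 2 = 1 then -1 else 1

-- ===== PRECONDITION & SPEC =====
-- Pre_ excludes exactly the inputs on which A raises IndexError: array_2 shorter than
-- array_1 while being a prefix of some rotation of array_1 (A's inner scan then reads past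
-- the end of array_2); on every other input A returns normally.
def Pre_verify_cyclic (array_1 : List Int) (array_2 : List Int) : Prop :=
  array_1.length ≤ array_2.length ∨
    ∀ i ∈ List.range array_1.length, ¬ array_2 <+: (array_1.drop i ++ array_1.take i)
instance (array_1 : List Int) (array_2 : List Int) : Decidable (Pre_verify_cyclic array_1 array_2) := by
  unfold Pre_verify_cyclic; infer_instance

def pvWitness_verify_cyclic : List Int × List Int := ([1, 2], [2, 1])

def Spec_verify_cyclic (array_1 : List Int) (array_2 : List Int) (out : Int) : Prop := out = verify_cyclic_alt array_1 array_2
instance (array_1 : List Int) (array_2 : List Int) (out : Int) : Decidable (Spec_verify_cyclic array_1 array_2 out) := by unfold Spec_verify_cyclic; infer_instance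

-- ===== CLAIM (what is proved, stated in full; the proofs are below) =====
def Claim_equal_verify_cyclic : Prop := ∀ (array_1 : List Int) (array_2 : List Int), Dom_verify_cyclic array_1 array_2 → Pre_verify_cyclic array_1 array_2 → Spec_verify_cyclic array_1 array_2 (verify_cyclic array_1 array_2)

-- ===== LEMMAS AND PROOFS =====

-- the un-reduced polynomial hash step and hash
def rawStep (h x : Int) : Int := h * pyB + x
def Hraw (l : List Int) : Int := l.foldl rawStep 0

theorem pyM_pos : (0 : Int) < pyM := by norm_num [pyM]

theorem hash_cong (l : List Int) : ∀ h h' : Int, h % pyM = h' % pyM →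
    (l.foldl hstep h) % pyM = (l.foldl rawStep h') % pyM := by
  induction l with
  | nil => intro h h' hh; simpa using hh
  | cons x t ih =>
    intro h h' hh
    simp only [List.foldl_cons]
    apply ih
    show PySem.Int.mod (h * pyB + x) pyM % pyM = (h' * pyB + x) % pyM
    rw [PySem.Int.mod_eq_emod_of_pos pyM_pos, Int.emod_emod_of_dvd _ dvd_rfl]
    exact Int.ModEq.add_right x (Int.ModEq.mul_right pyB hh)

theorem hash_range (l : List Int) : ∀ h : Int, 0 ≤ h → h < pyM →
    0 ≤ l.foldl hstep h ∧ l.foldl hstep h < pyM := by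
  induction l with
  | nil => intro h h0 h1; exact ⟨h0, h1⟩
  | cons x t ih =>
    intro h h0 h1
    simp only [List.foldl_cons]
    apply ih
    · show 0 ≤ PySem.Int.mod (h * pyB + x) pyM
      rw [PySem.Int.mod_eq_emod_of_pos pyM_pos]
      exact Int.emod_nonneg _ (by have := pyM_pos; omega)
    · show PySem.Int.mod (h * pyB + x) pyM < pyM
      rw [PySem.Int.mod_eq_emod_of_pos pyM_pos]
      exact Int.emod_lt_of_pos _ pyM_pos

theorem raw_shift (t : List Int) : ∀ h : Int, t.foldl rawStep h = h * pyB ^ t.length + Hraw t := by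
  induction t with
  | nil => intro h; simp [Hraw]
  | cons x t ih =>
    intro h
    show t.foldl rawStep (rawStep h x) = h * pyB ^ (x :: t).length + Hraw (x :: t)
    have h2 : Hraw (x :: t) = t.foldl rawStep (rawStep 0 x) := rfl
    rw [ih (rawStep h x), h2, ih (rawStep 0 x)]
    simp only [List.length_cons, rawStep]
    ring

theorem rolling (a c : Int) (t : List Int) :
    Hraw (t ++ [c]) = (Hraw (a :: t) - a * pyB ^ t.length) * pyB + c := by
  have h1 : Hraw (t ++ [c]) = rawStep (Hraw t) c := by
    show (t ++ [c]).foldl rawStep 0 = _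
    rw [List.foldl_append]
    rfl
  have h2 : Hraw (a :: t) = t.foldl rawStep (rawStep 0 a) := rfl
  rw [h1, h2, raw_shift t (rawStep 0 a)]
  simp only [rawStep]
  ring

theorem verifyLoop_true_iff (l1 l2 : List Int) : ∀ (rem l : Nat),
    (verifyLoop l1 l2 l rem = true ↔ ∀ m, l ≤ m → m < l + rem → l1.getD m 0 = l2.getD m 0) := by
  intro rem
  induction rem with
  | zero =>
    intro l
    simp only [verifyLoop, true_iff]
    intro m h1 h2
    omega
  | succ rem ih =>
    intro l
    simp only [verifyLoop]
    by_cases hx : l1.getD l 0 = l2.getD l 0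
    · rw [if_neg (not_not_intro hx), ih (l + 1)]
      constructor
      · intro h m h1 h2
        rcases Nat.eq_or_lt_of_le h1 with rfl | hlt
        · exact hx
        · exact h m hlt (by omega)
      · intro h m h1 h2
        exact h m (by omega) (by omega)
    · rw [if_pos hx]
      simp only [Bool.false_eq_true, false_iff]
      push Not
      exact ⟨l, le_rfl, by omega, hx⟩

theorem verify_true_iff (l1 l2 : List Int) (h : l1.length ≤ l2.length) :
    (verify l1 l2 = true ↔ l1 = l2.take l1.length) := by
  unfold verify
  rw [verifyLoop_true_iff]
  constructor
  · intro hpt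
    apply List.ext_getElem
    · simp [Nat.min_eq_left h]
    · intro i hi1 hi2
      have hg := hpt i (by omega) (by omega)
      rw [List.getD_eq_getElem _ _ hi1, List.getD_eq_getElem _ _ (by omega : i < l2.length)] at hg
      rw [List.getElem_take]
      exact hg
  · intro he m h0 h1
    have h1' : m < l1.length := by omega
    have h2 : m < l2.length := by omega
    rw [List.getD_eq_getElem _ _ h1', List.getD_eq_getElem _ _ h2,
      List.getElem_of_eq he h1', List.getElem_take]

theorem loop_eq (a1 a2 : List Int) (hp Bp : Int)
    (hlen : a1.length ≤ a2.length)
    (hpc : hp % pyM = Hraw (a2.take a1.length) % pyM)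
    (hp0 : 0 ≤ hp) (hp1 : hp < pyM)
    (hBp : Bp % pyM = pyB ^ (a1.length - 1) % pyM) :
    ∀ rem i hw, i + rem = a1.length → 0 ≤ hw → hw < pyM →
      hw % pyM = Hraw (((a1 ++ a1).drop i).take a1.length) % pyM →
      rkLoop (a1 ++ a1) (a2.take a1.length) a1.length hp Bp i hw rem
        = (match acLoop (a1 ++ a1) a2 a1.length i i rem with
           | (true, c) => (c : Int)
           | (false, _) => -1) := by
  intro rem
  induction rem with
  | zero => intro i hw _ _ _ _; rfl
  | succ rem ih =>
    intro i hw hsum hw0 hw1 hwc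
    set p := a1.length with hpdef
    have hip : i < p := by omega
    have hlt2 : i < (a1 ++ a1).length := by simp only [List.length_append]; omega
    have hipp : i + p < (a1 ++ a1).length := by simp only [List.length_append]; omega
    have hslice : PySem.List.slice (a1 ++ a1) (some (i : Int)) (some ((i : Int) + (p : Int)))
        = ((a1 ++ a1).drop i).take p := PySem.List.slice_natCast_add ..
    have hwin_len : (((a1 ++ a1).drop i).take p).length = p := by
      simp only [List.length_take, List.length_drop, List.length_append]; omega
    simp only [rkLoop, acLoop, hslice]
    by_cases hcase : ((a1 ++ a1).drop i).take p = a2.take p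
    · -- window matches: both loops stop here with shift i
      have hver : verify (((a1 ++ a1).drop i).take p) a2 = true := by
        rw [verify_true_iff _ _ (by rw [hwin_len]; exact hlen), hwin_len]
        exact hcase
      have hwhp : hw = hp := by
        have e1 : hw % pyM = hp % pyM := by rw [hwc, hcase, ← hpc]
        rwa [Int.emod_eq_of_lt hw0 hw1, Int.emod_eq_of_lt hp0 hp1] at e1
      rw [if_pos ⟨hwhp, hcase⟩]
      simp only [hver, if_true]
    · -- window does not match: both loops advance to shift i+1
      have hver : verify (((a1 ++ a1).drop i).take p) a2 = false := by
        rw [Bool.eq_false_iff]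
        intro hv
        have hv' := (verify_true_iff _ _ (by rw [hwin_len]; exact hlen)).mp hv
        rw [hwin_len] at hv'
        exact hcase hv'
      rw [if_neg (fun hand => hcase hand.2)]
      simp only [hver, Bool.false_eq_true, if_false]
      set a := (a1 ++ a1).getD i 0 with ha
      set c := (a1 ++ a1).getD (i + p) 0 with hc
      set tail := ((a1 ++ a1).drop (i + 1)).take (p - 1) with htl
      have hcons : ((a1 ++ a1).drop i).take p = a :: tail := by
        rw [List.drop_eq_getElem_cons hlt2, show p = (p - 1) + 1 by omega,
          List.take_succ_cons, ha, List.getD_eq_getElem _ _ hlt2]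
      have htail_len : tail.length = p - 1 := by
        rw [htl]
        simp only [List.length_take, List.length_drop, List.length_append]; omega
      have hnext : ((a1 ++ a1).drop (i + 1)).take p = tail ++ [c] := by
        have hgc : ((a1 ++ a1).drop (i + 1))[p - 1]? = some c := by
          rw [List.getElem?_drop, show (i + 1) + (p - 1) = i + p by omega,
            List.getElem?_eq_getElem hipp, hc, List.getD_eq_getElem _ _ hipp]
        rw [show p = (p - 1) + 1 by omega, List.take_add_one, hgc]
        rfl
      have hm' : PySem.Int.mod ((hw - a * Bp) * pyB + c) pyM
          = ((hw - a * Bp) * pyB + c) % pyM := PySem.Int.mod_eq_emod_of_pos pyM_pos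
      have hr0 : 0 ≤ PySem.Int.mod ((hw - a * Bp) * pyB + c) pyM := by
        rw [hm']; exact Int.emod_nonneg _ (by have := pyM_pos; omega)
      have hr1 : PySem.Int.mod ((hw - a * Bp) * pyB + c) pyM < pyM := by
        rw [hm']; exact Int.emod_lt_of_pos _ pyM_pos
      have hrc : PySem.Int.mod ((hw - a * Bp) * pyB + c) pyM % pyM
          = Hraw (((a1 ++ a1).drop (i + 1)).take p) % pyM := by
        calc PySem.Int.mod ((hw - a * Bp) * pyB + c) pyM % pyM
            = ((hw - a * Bp) * pyB + c) % pyM := by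
              rw [hm', Int.emod_emod_of_dvd _ dvd_rfl]
          _ = ((Hraw (((a1 ++ a1).drop i).take p) - a * pyB ^ (p - 1)) * pyB + c) % pyM :=
              Int.ModEq.add_right c (Int.ModEq.mul_right pyB
                (Int.ModEq.sub hwc (Int.ModEq.mul_left a hBp)))
          _ = Hraw (((a1 ++ a1).drop (i + 1)).take p) % pyM := by
              rw [hnext, rolling a c tail, hcons, htail_len]
      exact ih (i + 1) _ (by omega) hr0 hr1 hrc

theorem parity_eq (p c : Nat) :
    ((-1 : Int)) ^ ((p + 1) * c) = if p % 2 = 0 ∧ c % 2 = 1 then -1 else 1 := by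
  by_cases hc : p % 2 = 0 ∧ c % 2 = 1
  · rw [if_pos hc]
    apply Odd.neg_one_pow
    rw [Nat.odd_mul, Nat.odd_iff, Nat.odd_iff]
    omega
  · rw [if_neg hc]
    apply Even.neg_one_pow
    rw [Nat.even_mul, Nat.even_iff, Nat.even_iff]
    by_cases hp2 : p % 2 = 0
    · right; rcases Nat.even_or_odd c with h | h
      · rwa [Nat.even_iff] at h
      · rw [Nat.odd_iff] at h; exact absurd ⟨hp2, h⟩ hc
    · left; omega

-- window i of the doubled array is the i-th rotation
theorem win_eq_rot (a1 : List Int) (i : Nat) (hi : i ≤ a1.length) :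
    ((a1 ++ a1).drop i).take a1.length = a1.drop i ++ a1.take i := by
  rw [List.drop_append_of_le_length hi, List.take_append,
    List.take_of_length_le (by simp), List.length_drop,
    show a1.length - (a1.length - i) = i by omega]

theorem rk_stuck (text pattern : List Int) (p : Nat) (hp Bp : Int)
    (hne : ∀ i : Nat, i < p →
      PySem.List.slice text (some (i : Int)) (some ((i : Int) + (p : Int))) ≠ pattern) :
    ∀ rem i hw, i + rem ≤ p → rkLoop text pattern p hp Bp i hw rem = -1 := by
  intro rem
  induction rem with
  | zero => intros; rfl
  | succ rem ih =>
    intro i hw hle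
    simp only [rkLoop]
    rw [if_neg (fun h => hne i (by omega) h.2)]
    exact ih (i + 1) _ (by omega)

theorem ac_stuck (concatene array_2 : List Int) (p : Nat)
    (hver : ∀ i : Nat, i < p →
      verify (PySem.List.slice concatene (some (i : Int)) (some ((i : Int) + (p : Int)))) array_2
        = false) :
    ∀ rem i cyc, i + rem ≤ p → (acLoop concatene array_2 p i cyc rem).1 = false := by
  intro rem
  induction rem with
  | zero => intros; rfl
  | succ rem ih =>
    intro i cyc hle
    simp only [acLoop]
    rw [hver i (by omega)]
    simp only [Bool.false_eq_true, if_false]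
    exact ih (i + 1) (cyc + 1) (by omega)

-- when array_2 is shorter and not a prefix of the i-th rotation, A's inner scan finds a mismatch
theorem verify_false_of_not_prefix (a1 a2 : List Int) (hlen2 : a2.length < a1.length)
    (i : Nat) (hi : i < a1.length) (hnp : ¬ a2 <+: (a1.drop i ++ a1.take i)) :
    verify (((a1 ++ a1).drop i).take a1.length) a2 = false := by
  rw [Bool.eq_false_iff]
  intro htrue
  have hwl : (((a1 ++ a1).drop i).take a1.length).length = a1.length := by
    simp only [List.length_take, List.length_drop, List.length_append]; omega
  unfold verify at htrue
  rw [verifyLoop_true_iff] at htrue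
  apply hnp
  rw [← win_eq_rot a1 i (by omega)]
  have he : a2 = (((a1 ++ a1).drop i).take a1.length).take a2.length := by
    apply List.ext_getElem
    · simp only [List.length_take, List.length_drop, List.length_append]; omega
    · intro m h1 h2
      have hg := htrue m (Nat.zero_le m) (by omega)
      rw [List.getD_eq_getElem _ _ (by omega), List.getD_eq_getElem _ _ (by omega)] at hg
      rw [List.getElem_take]
      exact hg.symm
  rw [he]
  exact List.take_prefix ..

-- ===== VERDICT (by name: the statement is the Claim_ definition above) =====
theorem verify_cyclic_spec : Claim_equal_verify_cyclic := by
  intro a1 a2 _ hpre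
  unfold Pre_verify_cyclic at hpre
  unfold Spec_verify_cyclic verify_cyclic verify_cyclic_alt
  simp only []
  by_cases hp0 : a1.length = 0
  · have h1 : a1 = [] := List.eq_nil_of_length_eq_zero hp0
    subst h1
    simp [acLoop]
  · rw [if_neg hp0]
    have hsl1 : PySem.List.slice a2 none (some (a1.length : Int)) = a2.take a1.length :=
      PySem.List.slice_to_natCast ..
    have hsl2 : PySem.List.slice (a1 ++ a1) none (some (a1.length : Int))
        = (a1 ++ a1).take a1.length := PySem.List.slice_to_natCast ..
    rw [hsl1, hsl2]
    by_cases hlen : a1.length ≤ a2.length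
    · -- the claimed case with array_2 at least as long: A scans, B rolls the hash
      have hp01 := hash_range (a2.take a1.length) 0 le_rfl pyM_pos
      have hpc : ((a2.take a1.length).foldl hstep 0) % pyM = Hraw (a2.take a1.length) % pyM :=
        hash_cong _ 0 0 rfl
      have hw01 := hash_range ((a1 ++ a1).take a1.length) 0 le_rfl pyM_pos
      have hwc : (((a1 ++ a1).take a1.length).foldl hstep 0) % pyM
          = Hraw (((a1 ++ a1).drop 0).take a1.length) % pyM := by
        rw [List.drop_zero]; exact hash_cong _ 0 0 rfl
      have hBp : PySem.Int.powMod pyB (a1.length - 1) pyM % pyM = pyB ^ (a1.length - 1) % pyM := by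
        show PySem.Int.mod (pyB ^ (a1.length - 1)) pyM % pyM = _
        rw [PySem.Int.mod_eq_emod_of_pos pyM_pos, Int.emod_emod_of_dvd _ dvd_rfl]
      rw [loop_eq a1 a2 _ _ hlen hpc hp01.1 hp01.2 hBp a1.length 0 _ (by omega) hw01.1 hw01.2 hwc]
      set r := acLoop (a1 ++ a1) a2 a1.length 0 0 a1.length with hr
      rcases r with ⟨b, c⟩
      cases b
      · simp
      · simp only []
        rw [if_neg (by omega : ¬((c : Int) = -1))]
        have hm2 : PySem.Int.mod (c : Int) 2 = (c : Int) % 2 :=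
          PySem.Int.mod_eq_emod_of_pos (by norm_num)
        rw [if_pos True.intro, one_mul, parity_eq, hm2]
        by_cases hcnd : a1.length % 2 = 0 ∧ c % 2 = 1
        · rw [if_pos hcnd, if_pos ⟨hcnd.1, by have := hcnd.2; omega⟩]
        · rw [if_neg hcnd, if_neg (fun h => hcnd ⟨h.1, by have := h.2; omega⟩)]
    · -- array_2 shorter and (by Pre_) a prefix of no rotation: both sides return 0
      have hnp := hpre.resolve_left hlen
      have hlen2 : a2.length < a1.length := by omega
      have hne : ∀ i : Nat, i < a1.length →
          PySem.List.slice (a1 ++ a1) (some (i : Int)) (some ((i : Int) + (a1.length : Int)))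
            ≠ a2.take a1.length := by
        intro i hi h
        have hl := congrArg List.length h
        rw [PySem.List.slice_natCast_add ..] at hl
        simp only [List.length_take, List.length_drop, List.length_append] at hl
        omega
      rw [rk_stuck _ _ _ _ _ hne a1.length 0 _ (by omega), if_pos rfl]
      have hverf : ∀ i : Nat, i < a1.length →
          verify (PySem.List.slice (a1 ++ a1) (some (i : Int))
            (some ((i : Int) + (a1.length : Int)))) a2 = false := by
        intro i hi
        rw [PySem.List.slice_natCast_add ..]
        exact verify_false_of_not_prefix a1 a2 hlen2 i hi (hnp i (List.mem_range.mpr hi))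
      rw [ac_stuck _ _ _ hverf a1.length 0 0 (by omega)]
      simp
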